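-- pv_equiv track=rewrite | github.com/rabinkmc/dsa | python/493-q2.py | countCommas
-- ===== SOURCE A (Python) =====
-- def countCommas(n: int) -> int:
--     if n < 1000:
--         return 0
--
--     digits = 0
--     num = n
--     while num:
--         digits += 1
--         num = num // 10
--
--     ans = 0
--     for i in range(3, digits-1):
--         max_num = 10**(i+1) - 1
--         min_num = 10**(i)
--         ans += (max_num - min_num + 1) * (i // 3)
--     tmp = (n- 10**(digits - 1) + 1) * ((digits-1) // 3)
--     ans += tmp
--     return ans
-- ===== SOURCE B (Python) =====
-- def countCommas(n: int) -> int: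
--     # Each number m >= t contributes one comma per power-of-1000 threshold t <= m,
--     # so the total is the sum over thresholds t = 1000^k <= n of (n - t + 1).
--     ans = 0
--     t = 1000
--     while t <= n:
--         ans += n - t + 1
--         t *= 1000
--     return ans
-- ===== Notes on version B (the rewrite author's own statement) =====
-- stated objective: simpler
-- what changed: Replaces digit-counting plus per-digit-length range arithmetic with a single loop over power-of-1000 thresholds t, adding (n - t + 1) per threshold t <= n.
import Mathlib
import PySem

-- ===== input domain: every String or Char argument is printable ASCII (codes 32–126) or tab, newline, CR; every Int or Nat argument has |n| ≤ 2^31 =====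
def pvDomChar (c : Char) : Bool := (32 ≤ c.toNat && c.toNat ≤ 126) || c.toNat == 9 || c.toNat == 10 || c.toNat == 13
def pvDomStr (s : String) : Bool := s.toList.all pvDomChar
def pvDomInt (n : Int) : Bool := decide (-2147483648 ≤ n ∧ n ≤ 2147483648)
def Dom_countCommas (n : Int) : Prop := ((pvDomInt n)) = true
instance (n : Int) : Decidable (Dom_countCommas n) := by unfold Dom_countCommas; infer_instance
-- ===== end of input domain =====

-- B replaces A's digit-count + per-digit-length range arithmetic by one loop over
-- power-of-1000 thresholds (objective: simpler). Return-value equivalence only; no mutation.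

-- ===== PORT A =====
-- Python's `while num:` loop; guarded by 0 < num (the loop is only reached with
-- num = n ≥ 1000, and then num stays ≥ 0, so the guard is exact there; Python
-- diverges on negative num, which is unreachable).
def pvDigitLoop (digits num : Int) : Int :=
  if h : 0 < num then pvDigitLoop (digits + 1) (PySem.Int.floordiv num 10) else digits
termination_by num.toNat
decreasing_by
  rw [PySem.Int.floordiv_eq_ediv_of_pos (by norm_num : (0:Int) < 10)]
  omega

def countCommas (n : Int) : Int :=
  if n < 1000 then 0
  else
    let digits := pvDigitLoop 0 n
    -- 10**(i+1), 10**i, 10**(digits-1): exponents are nonnegative here (i ≥ 3, digits ≥ 4),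
    -- so Nat exponentiation via .toNat is exact.
    let ans := (PySem.List.pyRange 3 (digits - 1) 1).foldl
      (fun ans i =>
        let max_num := (10:Int) ^ (i + 1).toNat - 1
        let min_num := (10:Int) ^ i.toNat
        ans + (max_num - min_num + 1) * PySem.Int.floordiv i 3) 0
    let tmp := (n - (10:Int) ^ (digits - 1).toNat + 1) * PySem.Int.floordiv (digits - 1) 3
    ans + tmp

-- ===== PORT B =====
-- `while t <= n:` loop of Source B; the extra 0 < t in the guard only makes the recursion
-- total (t starts at 1000 and is multiplied by 1000, so 0 < t always holds on calls).
def pvAltLoop (n t acc : Int) : Int :=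
  if h : 0 < t ∧ t ≤ n then pvAltLoop n (t * 1000) (acc + (n - t + 1)) else acc
termination_by (n + 1 - t).toNat
decreasing_by omega

def countCommas_alt (n : Int) : Int := pvAltLoop n 1000 0

-- ===== PRECONDITION & SPEC =====
def Spec_countCommas (n : Int) (out : Int) : Prop := out = countCommas_alt n
instance (n : Int) (out : Int) : Decidable (Spec_countCommas n out) := by unfold Spec_countCommas; infer_instance

-- ===== CLAIM (what is proved, stated in full; the proofs are below) =====
def Claim_equal_countCommas : Prop := ∀ (n : Int), Dom_countCommas n → Spec_countCommas n (countCommas n)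

-- ===== LEMMAS AND PROOFS =====

theorem pvDigitLoop_pos (d num : Int) (h : 0 < num) :
    pvDigitLoop d num = pvDigitLoop (d + 1) (PySem.Int.floordiv num 10) := by
  conv_lhs => rw [pvDigitLoop]
  rw [dif_pos h]

theorem pvDigitLoop_nonpos (d num : Int) (h : ¬ 0 < num) : pvDigitLoop d num = d := by
  rw [pvDigitLoop, dif_neg h]

theorem pvAltLoop_step (n t acc : Int) (h : 0 < t ∧ t ≤ n) :
    pvAltLoop n t acc = pvAltLoop n (t * 1000) (acc + (n - t + 1)) := by
  conv_lhs => rw [pvAltLoop]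
  rw [dif_pos h]

theorem pvAltLoop_stop (n t acc : Int) (h : ¬ (0 < t ∧ t ≤ n)) : pvAltLoop n t acc = acc := by
  rw [pvAltLoop, dif_neg h]

-- for 10^k ≤ num < 10^(k+1), the digit loop counts k+1 digits
theorem pvDigitLoop_range (k : Nat) : ∀ (d num : Int),
    (10:Int) ^ k ≤ num → num < (10:Int) ^ (k + 1) → pvDigitLoop d num = d + (k + 1) := by
  induction k with
  | zero =>
    intro d num h1 h2
    norm_num at h1 h2
    rw [pvDigitLoop_pos d num (by omega),
        PySem.Int.floordiv_eq_ediv_of_pos (by norm_num : (0:Int) < 10)]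
    rw [pvDigitLoop_nonpos _ _ (by omega)]
    omega
  | succ k ih =>
    intro d num h1 h2
    have ha : (1:Int) ≤ (10:Int) ^ k := one_le_pow₀ (by norm_num)
    rw [pow_succ] at h1
    rw [pow_succ, pow_succ] at h2
    have hpos : 0 < num := by nlinarith
    rw [pvDigitLoop_pos d num hpos,
        PySem.Int.floordiv_eq_ediv_of_pos (by norm_num : (0:Int) < 10)]
    have h3 : (10:Int) ^ k ≤ num / 10 := by omega
    have h4 : num / 10 < (10:Int) ^ (k + 1) := by rw [pow_succ]; omega
    rw [ih (d + 1) (num / 10) h3 h4]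
    omega

-- ===== VERDICT (by name: the statement is the Claim_ definition above) =====
theorem countCommas_spec : Claim_equal_countCommas := by
  intro n hdom
  unfold Spec_countCommas countCommas countCommas_alt
  have hn : n ≤ 2147483648 := by
    have := hdom
    simp only [Dom_countCommas, pvDomInt, decide_eq_true_eq] at this
    omega
  by_cases hlt : n < 1000
  · rw [if_pos hlt, pvAltLoop_stop _ _ _ (by omega)]
  · rw [if_neg hlt]
    push Not at hlt
    have hcase : (1000 ≤ n ∧ n < 10000) ∨ (10000 ≤ n ∧ n < 100000) ∨
        (100000 ≤ n ∧ n < 1000000) ∨ (1000000 ≤ n ∧ n < 10000000) ∨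
        (10000000 ≤ n ∧ n < 100000000) ∨ (100000000 ≤ n ∧ n < 1000000000) ∨
        (1000000000 ≤ n ∧ n ≤ 2147483648) := by omega
    rcases hcase with h | h | h | h | h | h | h
    · have hd : pvDigitLoop 0 n = 4 := by
        have := pvDigitLoop_range 3 0 n (by norm_num; omega) (by norm_num; omega)
        simpa using this
      rw [hd, pvAltLoop_step _ _ _ (by omega), pvAltLoop_stop _ _ _ (by omega)]
      have hr : PySem.List.pyRange 3 (4 - 1) 1 = [] := by decide
      simp only [hr, List.foldl]
      norm_num [PySem.Int.floordiv, Int.fdiv, Int.toNat]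
    · have hd : pvDigitLoop 0 n = 5 := by
        have := pvDigitLoop_range 4 0 n (by norm_num; omega) (by norm_num; omega)
        simpa using this
      rw [hd, pvAltLoop_step _ _ _ (by omega), pvAltLoop_stop _ _ _ (by omega)]
      have hr : PySem.List.pyRange 3 (5 - 1) 1 = [3] := by decide
      simp only [hr, List.foldl]
      norm_num [PySem.Int.floordiv, Int.fdiv, Int.toNat]
      omega
    · have hd : pvDigitLoop 0 n = 6 := by
        have := pvDigitLoop_range 5 0 n (by norm_num; omega) (by norm_num; omega)
        simpa using this
      rw [hd, pvAltLoop_step _ _ _ (by omega), pvAltLoop_stop _ _ _ (by omega)]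
      have hr : PySem.List.pyRange 3 (6 - 1) 1 = [3, 4] := by decide
      simp only [hr, List.foldl]
      norm_num [PySem.Int.floordiv, Int.fdiv, Int.toNat]
      omega
    · have hd : pvDigitLoop 0 n = 7 := by
        have := pvDigitLoop_range 6 0 n (by norm_num; omega) (by norm_num; omega)
        simpa using this
      rw [hd, pvAltLoop_step _ _ _ (by omega), pvAltLoop_step _ _ _ (by omega), pvAltLoop_stop _ _ _ (by omega)]
      have hr : PySem.List.pyRange 3 (7 - 1) 1 = [3, 4, 5] := by decide
      simp only [hr, List.foldl]
      norm_num [PySem.Int.floordiv, Int.fdiv, Int.toNat]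
      omega
    · have hd : pvDigitLoop 0 n = 8 := by
        have := pvDigitLoop_range 7 0 n (by norm_num; omega) (by norm_num; omega)
        simpa using this
      rw [hd, pvAltLoop_step _ _ _ (by omega), pvAltLoop_step _ _ _ (by omega), pvAltLoop_stop _ _ _ (by omega)]
      have hr : PySem.List.pyRange 3 (8 - 1) 1 = [3, 4, 5, 6] := by decide
      simp only [hr, List.foldl]
      norm_num [PySem.Int.floordiv, Int.fdiv, Int.toNat]
      omega
    · have hd : pvDigitLoop 0 n = 9 := by
        have := pvDigitLoop_range 8 0 n (by norm_num; omega) (by norm_num; omega)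
        simpa using this
      rw [hd, pvAltLoop_step _ _ _ (by omega), pvAltLoop_step _ _ _ (by omega), pvAltLoop_stop _ _ _ (by omega)]
      have hr : PySem.List.pyRange 3 (9 - 1) 1 = [3, 4, 5, 6, 7] := by decide
      simp only [hr, List.foldl]
      norm_num [PySem.Int.floordiv, Int.fdiv, Int.toNat]
      omega
    · have hd : pvDigitLoop 0 n = 10 := by
        have := pvDigitLoop_range 9 0 n (by norm_num; omega) (by norm_num; omega)
        simpa using this
      rw [hd, pvAltLoop_step _ _ _ (by omega), pvAltLoop_step _ _ _ (by omega), pvAltLoop_step _ _ _ (by omega), pvAltLoop_stop _ _ _ (by omega)]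
      have hr : PySem.List.pyRange 3 (10 - 1) 1 = [3, 4, 5, 6, 7, 8] := by decide
      simp only [hr, List.foldl]
      norm_num [PySem.Int.floordiv, Int.fdiv, Int.toNat]
      omega
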